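-- pv_equiv track=rewrite | github.com/BuzzBerryCode/unifiedscrapers | scraper-dashboard/backend/api_reliability_fix.py | format_error_summary
-- ===== SOURCE A (Python) =====
-- from typing import Dict, Optional, Tuple
--
-- def format_error_summary(results: Dict) -> str:
--     """Format a summary of errors for job reporting."""
--     if 'failed' not in results:
--         return "No errors"
--
--     error_summary = {}
--     for failed_item in results['failed']:
--         # Extract error type from error message
--         if ' - ' in failed_item:
--             error_part = failed_item.split(' - ', 1)[1]
--             if 'rate_limited' in error_part.lower():
--                 error_type = 'Rate Limited'
--             elif 'timeout' in error_part.lower():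
--                 error_type = 'Timeout'
--             elif 'server_error' in error_part.lower():
--                 error_type = 'Server Error'
--             elif 'profile_not_found' in error_part.lower():
--                 error_type = 'Profile Not Found'
--             elif 'access_denied' in error_part.lower():
--                 error_type = 'Access Denied'
--             elif 'circuit_breaker' in error_part.lower():
--                 error_type = 'Circuit Breaker'
--             else:
--                 error_type = 'Other API Error'
--         else:
--             error_type = 'Unknown Error'
--
--         error_summary[error_type] = error_summary.get(error_type, 0) + 1
--
--     summary_parts = [f"{error_type}: {count}" for error_type, count in error_summary.items()]
--     return " | ".join(summary_parts)
-- ===== SOURCE B (Python) =====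
-- _PATTERNS = [
--     ('rate_limited', 'Rate Limited'),
--     ('timeout', 'Timeout'),
--     ('server_error', 'Server Error'),
--     ('profile_not_found', 'Profile Not Found'),
--     ('access_denied', 'Access Denied'),
--     ('circuit_breaker', 'Circuit Breaker'),
-- ]
--
--
-- def _classify(failed_item):
--     """Map one failed item to its error label via the ordered pattern table."""
--     if ' - ' not in failed_item:
--         return 'Unknown Error'
--     part = failed_item.split(' - ', 1)[1].lower()
--     for sub, label in _PATTERNS:
--         if sub in part:
--             return label
--     return 'Other API Error'
--
--
-- def _tally(labels):
--     """Select-count-remove recursion: take the first label, count all its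
--     occurrences, strip them out, and recurse on the remainder.  Output pairs
--     come out in first-occurrence order with no dictionary involved."""
--     if not labels:
--         return []
--     head, rest = labels[0], labels[1:]
--     return [(head, 1 + rest.count(head))] + _tally([l for l in rest if l != head])
--
--
-- def format_error_summary(results):
--     """Format a summary of errors for job reporting."""
--     if 'failed' not in results:
--         return "No errors"
--     labels = [_classify(item) for item in results['failed']]
--     return " | ".join(f"{lab}: {n}" for lab, n in _tally(labels))
-- ===== Notes on version B (the rewrite author's own statement) =====
-- stated objective: alternative
-- what changed: Replaces A's single-pass dict accumulation (and inline if/elif chain) with a table-driven classifier plus a recursive select-count-remove tally: take the first label, count its occurrences, strip them out and recurse, so the (label,count) pairs are built front-to-back with no dictionary.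
import Mathlib
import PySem

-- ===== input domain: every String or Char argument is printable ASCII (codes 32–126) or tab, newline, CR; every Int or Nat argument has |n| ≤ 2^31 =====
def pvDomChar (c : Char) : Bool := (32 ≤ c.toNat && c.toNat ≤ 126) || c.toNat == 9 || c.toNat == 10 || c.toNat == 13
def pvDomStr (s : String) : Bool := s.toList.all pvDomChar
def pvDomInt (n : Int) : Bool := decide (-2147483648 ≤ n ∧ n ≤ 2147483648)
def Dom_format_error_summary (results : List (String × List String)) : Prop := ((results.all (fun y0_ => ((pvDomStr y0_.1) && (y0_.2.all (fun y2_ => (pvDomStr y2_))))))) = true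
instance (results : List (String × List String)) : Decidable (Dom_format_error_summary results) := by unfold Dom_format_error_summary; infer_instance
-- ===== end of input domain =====

-- B classifies via an ordered pattern table and counts by a recursive select-count-remove
-- tally (no dictionary) instead of A's if/elif chain + dict accumulation; same return value.

-- ===== PORT A =====
def format_error_summary (results : List (String × List String)) : String :=
  match (PySem.Dict.mk results).get? "failed" with
  | none => "No errors"
  | some failed =>
    let errorSummary := failed.foldl (fun d failedItem =>
      let errorType :=
        if PySem.Str.isIn " - " failedItem then
          -- failed_item.split(' - ', 1)[1]: inside this branch the split has a piece at index 1
          let errorPart := ((PySem.Str.splitMax? failedItem " - " 1).getD []).getD 1 ""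
          if PySem.Str.isIn "rate_limited" (PySem.Str.lower errorPart) then "Rate Limited"
          else if PySem.Str.isIn "timeout" (PySem.Str.lower errorPart) then "Timeout"
          else if PySem.Str.isIn "server_error" (PySem.Str.lower errorPart) then "Server Error"
          else if PySem.Str.isIn "profile_not_found" (PySem.Str.lower errorPart) then "Profile Not Found"
          else if PySem.Str.isIn "access_denied" (PySem.Str.lower errorPart) then "Access Denied"
          else if PySem.Str.isIn "circuit_breaker" (PySem.Str.lower errorPart) then "Circuit Breaker"
          else "Other API Error"
        else "Unknown Error"
      d.insert errorType (d.getD errorType 0 + 1)) (PySem.Dict.empty (κ := String) (ν := Int))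
    PySem.Str.join " | "
      (errorSummary.items.map (fun p => p.1 ++ ": " ++ PySem.Int.toStr p.2))


-- ===== PORT B =====
def pvPatterns : List (String × String) :=
  [("rate_limited", "Rate Limited"), ("timeout", "Timeout"), ("server_error", "Server Error"),
   ("profile_not_found", "Profile Not Found"), ("access_denied", "Access Denied"),
   ("circuit_breaker", "Circuit Breaker")]

-- the 'for sub, label in _PATTERNS' loop with early return
def pvScan (part : String) : List (String × String) → String
  | [] => "Other API Error"
  | (sub, label) :: rest => if PySem.Str.isIn sub part then label else pvScan part rest

def pvClassify (failedItem : String) : String :=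
  if PySem.Str.isIn " - " failedItem then
    pvScan (PySem.Str.lower (((PySem.Str.splitMax? failedItem " - " 1).getD []).getD 1 "")) pvPatterns
  else "Unknown Error"

-- select-count-remove recursion of Source B's _tally
def pvTally (labels : List String) : List (String × Int) :=
  match labels with
  | [] => []
  | head :: rest =>
      (head, 1 + (rest.count head : Int)) :: pvTally (rest.filter (fun l => decide (l ≠ head)))
termination_by labels.length
decreasing_by simpa using le_trans (List.length_filter_le _ rest.attach) (le_of_eq (List.length_attach (l := rest)))

def format_error_summary_alt (results : List (String × List String)) : String :=
  match (PySem.Dict.mk results).get? "failed" with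
  | none => "No errors"
  | some failed =>
    let labels := failed.map pvClassify
    PySem.Str.join " | "
      ((pvTally labels).map (fun p => p.1 ++ ": " ++ PySem.Int.toStr p.2))


-- ===== PRECONDITION & SPEC =====
def Spec_format_error_summary (results : List (String × List String)) (out : String) : Prop := out = format_error_summary_alt results
instance (results : List (String × List String)) (out : String) : Decidable (Spec_format_error_summary results out) := by unfold Spec_format_error_summary; infer_instance

-- ===== CLAIM (what is proved, stated in full; the proofs are below) =====
def Claim_equal_format_error_summary : Prop := ∀ (results : List (String × List String)), Dom_format_error_summary results → Spec_format_error_summary results (format_error_summary results)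

-- ===== LEMMAS AND PROOFS =====

theorem pvClassify_chain_eq (failedItem : String) :
    (if PySem.Str.isIn " - " failedItem then
      let errorPart := ((PySem.Str.splitMax? failedItem " - " 1).getD []).getD 1 ""
      if PySem.Str.isIn "rate_limited" (PySem.Str.lower errorPart) then "Rate Limited"
      else if PySem.Str.isIn "timeout" (PySem.Str.lower errorPart) then "Timeout"
      else if PySem.Str.isIn "server_error" (PySem.Str.lower errorPart) then "Server Error"
      else if PySem.Str.isIn "profile_not_found" (PySem.Str.lower errorPart) then "Profile Not Found"
      else if PySem.Str.isIn "access_denied" (PySem.Str.lower errorPart) then "Access Denied"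
      else if PySem.Str.isIn "circuit_breaker" (PySem.Str.lower errorPart) then "Circuit Breaker"
      else "Other API Error"
    else "Unknown Error") = pvClassify failedItem := by
  unfold pvClassify pvPatterns pvScan
  cases h : PySem.Str.isIn " - " failedItem <;> simp [pvScan]

theorem ofList_filter_comm (p : String → Bool) (t : List String) :
    PySem.Set.ofList (t.filter p) = List.filter p (PySem.Set.ofList t) := by
  induction t with
  | nil => rfl
  | cons b t ih =>
    by_cases hb : p b
    · simp only [List.filter_cons, hb, if_true, PySem.Set.ofList_cons, PySem.Set.discard, ih,
        List.filter_filter]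
      refine congrArg _ (List.filter_congr ?_)
      intro x _; rw [Bool.and_comm]
    · simp only [List.filter_cons, hb, Bool.false_eq_true, if_false, PySem.Set.ofList_cons,
        PySem.Set.discard, ih, List.filter_filter]
      refine List.filter_congr ?_
      intro x _
      by_cases hx : x = b
      · subst hx; simp_all
      · simp [hx]

theorem dedup_cons_filter (a : String) (t : List String) :
    PySem.List.dedup (a :: t) = a :: PySem.List.dedup (t.filter (fun l => decide (l ≠ a))) := by
  show PySem.Set.ofList (a :: t) = a :: PySem.Set.ofList (t.filter (fun l => decide (l ≠ a)))
  rw [PySem.Set.ofList_cons, ofList_filter_comm]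
  refine congrArg _ ?_
  unfold PySem.Set.discard
  exact (List.filter_congr (fun x _ => by by_cases hx : x = a <;> simp [hx])).symm

theorem pvTally_eq (l : List String) :
    pvTally l = (PySem.List.dedup l).map (fun k => (k, (l.count k : Int))) := by
  match l with
  | [] => simp [pvTally]
  | a :: t =>
    have ih := pvTally_eq (t.filter (fun l => decide (l ≠ a)))
    rw [pvTally, dedup_cons_filter, List.map_cons, ih]
    refine congrArg₂ _ ?_ (List.map_congr_left ?_)
    · simp; ring
    · intro k hk
      have hka : k ≠ a := by
        have : k ∈ t.filter (fun l => decide (l ≠ a)) := ((PySem.List.mem_dedup _ k).mp hk)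
        simpa using (List.mem_filter.mp this).2
      simp [List.count_filter, hka, Ne.symm hka]
termination_by l.length
decreasing_by simpa using le_trans (List.length_filter_le _ _) (le_of_eq rfl)

-- A's accumulation loop over failed items equals the counter over the classified labels.
theorem pvFoldA_eq (l : List String) :
    l.foldl (fun d failedItem =>
      let errorType :=
        if PySem.Str.isIn " - " failedItem then
          let errorPart := ((PySem.Str.splitMax? failedItem " - " 1).getD []).getD 1 ""
          if PySem.Str.isIn "rate_limited" (PySem.Str.lower errorPart) then "Rate Limited"
          else if PySem.Str.isIn "timeout" (PySem.Str.lower errorPart) then "Timeout"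
          else if PySem.Str.isIn "server_error" (PySem.Str.lower errorPart) then "Server Error"
          else if PySem.Str.isIn "profile_not_found" (PySem.Str.lower errorPart) then "Profile Not Found"
          else if PySem.Str.isIn "access_denied" (PySem.Str.lower errorPart) then "Access Denied"
          else if PySem.Str.isIn "circuit_breaker" (PySem.Str.lower errorPart) then "Circuit Breaker"
          else "Other API Error"
        else "Unknown Error"
      d.insert errorType (d.getD errorType 0 + 1)) (PySem.Dict.empty (κ := String) (ν := Int))
    = PySem.Dict.counter (l.map pvClassify) := by
  rw [← PySem.Dict.foldl_insert_getD_add_one_eq_counter]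
  generalize (PySem.Dict.empty (κ := String) (ν := Int)) = d
  induction l generalizing d with
  | nil => rfl
  | cons a t ih =>
    simp only [List.foldl_cons, List.map_cons, ih]
    rw [pvClassify_chain_eq]

-- ===== VERDICT (by name: the statement is the Claim_ definition above) =====
theorem format_error_summary_spec : Claim_equal_format_error_summary := by
  intro results _
  unfold Spec_format_error_summary format_error_summary format_error_summary_alt
  cases h : (PySem.Dict.mk results).get? "failed" with
  | none => rfl
  | some failed =>
    simp only [pvFoldA_eq, PySem.Dict.items_counter, pvTally_eq,
      PySem.List.dedup_eq_ofList, List.map_map, Function.comp_def]
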